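-- pv_equiv track=rewrite | github.com/dezihh/MYEquilibrium | playground/IR/ir_converter.py | parse_flipper
-- ===== SOURCE A (Python) =====
-- def parse_flipper(content):
--     """Parst Flipper Format"""
--     entries = []
--     lines = content.strip().split('\n')
--
--     device_brand = "Unknown"
--     device_type = "Unknown"
--
--     # Extrahiere Device Info
--     for line in lines:
--         if line.startswith('#Flipper:'):
--             parts = line.replace('#Flipper:', '').split(':')
--             if len(parts) >= 2:
--                 device_brand = parts[0].strip()
--                 device_type = parts[1].strip()
--             break
--
--     current_entry = None
--
--     for line in lines:
--         line = line.strip()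
--
--         if line.startswith('name:'):
--             if current_entry:
--                 entries.append(current_entry)
--             current_entry = {
--                 'format': 'flipper',
--                 'name': line.split(':', 1)[1].strip(),
--                 'device_brand': device_brand,
--                 'device_type': device_type
--             }
--         elif current_entry and ':' in line:
--             key, value = line.split(':', 1)
--             current_entry[key.strip()] = value.strip()
--
--     if current_entry:
--         entries.append(current_entry)
--
--     return entries
-- ===== SOURCE B (Python) =====
-- def parse_flipper(content):
--     """Parst Flipper Format (segment-then-map re-implementation)"""
--     lines = content.strip().split('\n')
--
--     device_brand = "Unknown"
--     device_type = "Unknown"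
--     for line in lines:
--         if line.startswith('#Flipper:'):
--             parts = line.replace('#Flipper:', '').split(':')
--             if len(parts) >= 2:
--                 device_brand = parts[0].strip()
--                 device_type = parts[1].strip()
--             break
--
--     stripped = [l.strip() for l in lines]
--
--     # group the stripped lines: a record starts at each 'name:' line;
--     # lines before the first 'name:' line are discarded
--     groups = []
--     n = len(stripped)
--     i = 0
--     while i < n and not stripped[i].startswith('name:'):
--         i += 1
--     while i < n:
--         j = i + 1
--         while j < n and not stripped[j].startswith('name:'):
--             j += 1
--         groups.append(stripped[i:j])
--         i = j
--
--     def to_entry(group):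
--         entry = {
--             'format': 'flipper',
--             'name': group[0].split(':', 1)[1].strip(),
--             'device_brand': device_brand,
--             'device_type': device_type,
--         }
--         for line in group[1:]:
--             if ':' in line:
--                 key, value = line.split(':', 1)
--                 entry[key.strip()] = value.strip()
--         return entry
--
--     return [to_entry(g) for g in groups]
-- ===== Notes on version B (the rewrite author's own statement) =====
-- stated objective: alternative
-- what changed: Replaces the current_entry sentinel with append-on-next-name bookkeeping by a two-phase pipeline: first segment the stripped lines into record groups starting at each 'name:' line (discarding lines before the first), then map each group independently to its entry dict.
import Mathlib
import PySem

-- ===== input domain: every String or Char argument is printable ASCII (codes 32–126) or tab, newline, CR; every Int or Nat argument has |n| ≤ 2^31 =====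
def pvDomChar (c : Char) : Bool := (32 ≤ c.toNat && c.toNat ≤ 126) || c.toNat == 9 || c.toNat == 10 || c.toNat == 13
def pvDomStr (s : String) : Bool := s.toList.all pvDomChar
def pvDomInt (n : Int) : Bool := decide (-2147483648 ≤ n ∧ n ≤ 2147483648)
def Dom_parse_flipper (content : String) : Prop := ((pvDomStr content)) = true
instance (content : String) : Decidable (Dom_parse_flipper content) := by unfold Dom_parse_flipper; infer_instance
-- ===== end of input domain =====

-- B replaces A's current_entry sentinel loop by segmenting the stripped lines into
-- record groups (one per 'name:' line) and mapping each group to its dict (objective: alternative).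

-- ===== PORT A =====
-- device-info extraction loop: identical Python code in A and B, so shared by both ports
def pvDeviceInfo : List String → String × String
  | [] => ("Unknown", "Unknown")
  | l :: rest =>
    if PySem.Str.startswith l "#Flipper:" then
      let parts := (PySem.Str.split? (PySem.Str.replace l "#Flipper:" "") ":").getD []
      if 2 ≤ parts.length then
        (PySem.Str.strip (parts.getD 0 ""), PySem.Str.strip (parts.getD 1 ""))
      else ("Unknown", "Unknown")
    else pvDeviceInfo rest

-- the dict literal creating a new entry from a (stripped) 'name:' line; same code in A and B
-- (list indices guaranteed in range by the 'name:' / ':'-membership guards, so getD is exact)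
def pvInitEntry (db dt line : String) : PySem.Dict String String :=
  ((((PySem.Dict.empty.insert "format" "flipper").insert
      "name" (PySem.Str.strip (((PySem.Str.splitMax? line ":" 1).getD []).getD 1 ""))).insert
      "device_brand" db).insert "device_type" dt)

-- the "':' in line: key, value = line.split(':', 1); entry[key.strip()] = value.strip()" step; same code in A and B
def pvAddLine (e : PySem.Dict String String) (line : String) : PySem.Dict String String :=
  if PySem.Str.isIn ":" line then
    let kv := (PySem.Str.splitMax? line ":" 1).getD []
    e.insert (PySem.Str.strip (kv.getD 0 "")) (PySem.Str.strip (kv.getD 1 ""))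
  else e

-- A's loop body after 'line = line.strip()'
def pvStepACore (db dt : String)
    (st : List (PySem.Dict String String) × Option (PySem.Dict String String))
    (line : String) : List (PySem.Dict String String) × Option (PySem.Dict String String) :=
  if PySem.Str.startswith line "name:" then
    ((match st.2 with | some e => st.1 ++ [e] | none => st.1), some (pvInitEntry db dt line))
  else
    match st.2 with
    | some e => (st.1, some (pvAddLine e line))
    | none => st

def pvStepA (db dt : String)
    (st : List (PySem.Dict String String) × Option (PySem.Dict String String))
    (line0 : String) : List (PySem.Dict String String) × Option (PySem.Dict String String) :=
  pvStepACore db dt st (PySem.Str.strip line0)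

def parse_flipper (content : String) : List (List (String × String)) :=
  let lines := (PySem.Str.split? (PySem.Str.strip content) "\n").getD []
  let dev := pvDeviceInfo lines
  let st := lines.foldl (pvStepA dev.1 dev.2) ([], none)
  let entries := match st.2 with | some e => st.1 ++ [e] | none => st.1
  entries.map PySem.Dict.items

-- ===== PORT B =====
-- segment the (already stripped) lines: a group starts at each 'name:' line,
-- lines before the first one are discarded (B's two while loops, as span recursion)
def pvGroups : List String → List (List String)
  | [] => []
  | l :: rest =>
    if PySem.Str.startswith l "name:" then
      (l :: rest.takeWhile (fun x => !(PySem.Str.startswith x "name:"))) ::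
        pvGroups (rest.dropWhile (fun x => !(PySem.Str.startswith x "name:")))
    else pvGroups rest
termination_by ls => ls.length
decreasing_by
  · exact Nat.lt_succ_of_le (List.length_dropWhile_le _ _)
  · exact Nat.lt_succ_of_le (Nat.le_refl _)

-- B's to_entry: initial dict from the group's 'name:' head, then fold the body lines in
def pvEntryOf (db dt : String) (g : List String) : PySem.Dict String String :=
  match g with
  | [] => PySem.Dict.empty   -- unreachable: every group starts with its 'name:' line
  | h :: t => t.foldl pvAddLine (pvInitEntry db dt h)

def parse_flipper_alt (content : String) : List (List (String × String)) :=
  let lines := (PySem.Str.split? (PySem.Str.strip content) "\n").getD []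
  let dev := pvDeviceInfo lines
  let stripped := lines.map PySem.Str.strip
  ((pvGroups stripped).map (pvEntryOf dev.1 dev.2)).map PySem.Dict.items

-- ===== PRECONDITION & SPEC =====
def Spec_parse_flipper (content : String) (out : List (List (String × String))) : Prop := out = parse_flipper_alt content
instance (content : String) (out : List (List (String × String))) : Decidable (Spec_parse_flipper content out) := by unfold Spec_parse_flipper; infer_instance

-- ===== CLAIM (what is proved, stated in full; the proofs are below) =====
def Claim_equal_parse_flipper : Prop := ∀ (content : String), Dom_parse_flipper content → Spec_parse_flipper content (parse_flipper content)

-- ===== LEMMAS AND PROOFS =====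

-- finishing step of A's loop (the trailing 'if current_entry: entries.append(current_entry)')
def pvFinish (st : List (PySem.Dict String String) × Option (PySem.Dict String String)) :
    List (PySem.Dict String String) :=
  match st.2 with | some e => st.1 ++ [e] | none => st.1

lemma foldCore_some (db dt : String) (ls : List String) :
    ∀ (entries : List (PySem.Dict String String)) (e : PySem.Dict String String),
    pvFinish (ls.foldl (pvStepACore db dt) (entries, some e)) =
      entries ++ (ls.takeWhile (fun x => !(PySem.Str.startswith x "name:"))).foldl pvAddLine e ::
        (pvGroups (ls.dropWhile (fun x => !(PySem.Str.startswith x "name:")))).map (pvEntryOf db dt) := by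
  induction ls with
  | nil => intro entries e; simp [pvFinish, pvGroups]
  | cons l ls ih =>
    intro entries e
    by_cases h : PySem.Str.startswith l "name:" = true
    · simp at h
      rw [List.foldl_cons,
        show pvStepACore db dt (entries, some e) l = (entries ++ [e], some (pvInitEntry db dt l)) from by
          simp [pvStepACore, h],
        ih]
      simp [h, pvGroups, pvEntryOf]
    · simp at h
      rw [List.foldl_cons,
        show pvStepACore db dt (entries, some e) l = (entries, some (pvAddLine e l)) from by
          simp [pvStepACore, h],
        ih]
      simp [h]

lemma foldCore_none (db dt : String) (ls : List String) :
    ∀ (entries : List (PySem.Dict String String)),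
    pvFinish (ls.foldl (pvStepACore db dt) (entries, none)) =
      entries ++ (pvGroups ls).map (pvEntryOf db dt) := by
  induction ls with
  | nil => intro entries; simp [pvFinish, pvGroups]
  | cons l ls ih =>
    intro entries
    by_cases h : PySem.Str.startswith l "name:" = true
    · simp at h
      rw [List.foldl_cons,
        show pvStepACore db dt (entries, none) l = (entries, some (pvInitEntry db dt l)) from by
          simp [pvStepACore, h],
        foldCore_some]
      simp [h, pvGroups, pvEntryOf]
    · simp at h
      rw [List.foldl_cons,
        show pvStepACore db dt (entries, none) l = (entries, none) from by
          simp [pvStepACore, h],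
        ih]
      simp [h, pvGroups]

-- ===== VERDICT (by name: the statement is the Claim_ definition above) =====
theorem parse_flipper_spec : Claim_equal_parse_flipper := by
  intro content _
  unfold Spec_parse_flipper
  have key : ∀ (lines : List String) (db dt : String),
      (match (lines.foldl (pvStepA db dt) ([], none)).2 with
        | some e => (lines.foldl (pvStepA db dt) ([], none)).1 ++ [e]
        | none => (lines.foldl (pvStepA db dt) ([], none)).1).map PySem.Dict.items
      = ((pvGroups (lines.map PySem.Str.strip)).map (pvEntryOf db dt)).map PySem.Dict.items := by
    intro lines db dt
    have h1 : lines.foldl (pvStepA db dt) ([], none) =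
        (lines.map PySem.Str.strip).foldl (pvStepACore db dt) ([], none) := by
      rw [List.foldl_map]; rfl
    have h2 := foldCore_none db dt (lines.map PySem.Str.strip) []
    simp only [pvFinish] at h2
    rw [h1, h2, List.nil_append]
  exact key _ _ _
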